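-- pv_equiv track=rewrite | github.com/nptit/python-snippets | checkio/letter-queue.py | letter_queue
-- ===== SOURCE A (Python) =====
-- from collections import deque
--
-- def letter_queue(commands):
--     q = deque()
--     for c in commands:
--         if c[0:2] == 'PU':
--             q.append(c.split()[-1])
--         elif c[0:2] == 'PO':
--             if q:
--                 q.popleft()
--
--     return ''.join(q)
-- ===== SOURCE B (Python) =====
-- def letter_queue(commands):
--     # Two staged passes: first count pushes/effective pops with plain integers,
--     # then collect exactly the pushed letters whose push index survived.
--     pushes = 0
--     removed = 0
--     for c in commands:
--         if c[0:2] == 'PU':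
--             pushes += 1
--         elif c[0:2] == 'PO' and removed < pushes:
--             removed += 1
--     out = []
--     i = 0
--     for c in commands:
--         if c[0:2] == 'PU':
--             if i >= removed:
--                 out.append(c.split()[-1])
--             i += 1
--     return ''.join(out)
-- ===== Notes on version B (the rewrite author's own statement) =====
-- stated objective: alternative
-- what changed: Replaces the single-pass mutable deque simulation by two staged passes: an integer-only pass counting pushes and effective pops, then a collection pass that keeps only pushed letters whose push index is at least the removed count.
import Mathlib
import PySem

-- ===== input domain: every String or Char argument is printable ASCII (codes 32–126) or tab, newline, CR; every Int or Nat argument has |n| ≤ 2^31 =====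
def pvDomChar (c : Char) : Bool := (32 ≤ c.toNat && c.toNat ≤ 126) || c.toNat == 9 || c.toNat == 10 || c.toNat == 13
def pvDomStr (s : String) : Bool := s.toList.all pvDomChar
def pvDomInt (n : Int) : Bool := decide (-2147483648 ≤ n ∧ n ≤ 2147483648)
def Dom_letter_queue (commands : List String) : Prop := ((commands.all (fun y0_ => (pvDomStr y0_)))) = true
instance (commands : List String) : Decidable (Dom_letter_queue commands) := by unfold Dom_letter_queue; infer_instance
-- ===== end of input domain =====

-- B replaces A's one-pass mutable deque by two staged integer/collection passes;
-- same asymptotic cost, different decomposition.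

-- ===== PORT A =====
-- loop body of A: push on 'PU', popleft (if nonempty) on 'PO'
def pvStepA (q : List String) (c : String) : List String :=
  if PySem.Str.slice c (some 0) (some 2) = "PU" then
    -- c.split()[-1]; the guard makes the split nonempty, so the default is unreachable
    q ++ [(PySem.List.pyGet? (PySem.Str.split₀ c) (-1)).getD ""]
  else if PySem.Str.slice c (some 0) (some 2) = "PO" then
    if q = [] then q else q.tail   -- 'if q: q.popleft()'
  else q

def letter_queue (commands : List String) : String :=
  PySem.Str.join "" (commands.foldl pvStepA [])

-- ===== PORT B =====
-- c.split()[-1]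
def pvLast (c : String) : String :=
  (PySem.List.pyGet? (PySem.Str.split₀ c) (-1)).getD ""

-- first pass: (pushes, removed) integer counters
def pvCount (st : Nat × Nat) (c : String) : Nat × Nat :=
  if PySem.Str.slice c (some 0) (some 2) = "PU" then (st.1 + 1, st.2)
  else if PySem.Str.slice c (some 0) (some 2) = "PO" ∧ st.2 < st.1 then (st.1, st.2 + 1)
  else st

-- second pass: (out, i); keep the pushed letter when i >= removed
def pvCollect (removed : Nat) (st : List String × Nat) (c : String) : List String × Nat :=
  if PySem.Str.slice c (some 0) (some 2) = "PU" then
    ((if removed ≤ st.2 then st.1 ++ [pvLast c] else st.1), st.2 + 1)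
  else st

def letter_queue_alt (commands : List String) : String :=
  let removed := (commands.foldl pvCount (0, 0)).2
  PySem.Str.join "" (commands.foldl (pvCollect removed) ([], 0)).1

-- ===== PRECONDITION & SPEC =====
def Spec_letter_queue (commands : List String) (out : String) : Prop := out = letter_queue_alt commands
instance (commands : List String) (out : String) : Decidable (Spec_letter_queue commands out) := by unfold Spec_letter_queue; infer_instance

-- ===== CLAIM =====
def Claim_equal_letter_queue : Prop := ∀ (commands : List String), Dom_letter_queue commands → Spec_letter_queue commands (letter_queue commands)

-- ===== LEMMAS AND PROOFS =====
-- all pushed letters of a command list, in order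
def pvLetters (cs : List String) : List String :=
  cs.filterMap (fun c => if PySem.Str.slice c (some 0) (some 2) = "PU" then some (pvLast c) else none)

lemma pvLetters_cons_pu (c : String) (cs : List String)
    (h : PySem.Str.slice c (some 0) (some 2) = "PU") :
    pvLetters (c :: cs) = pvLast c :: pvLetters cs := by
  simp [pvLetters, h]

lemma pvLetters_cons_other (c : String) (cs : List String)
    (h : ¬ PySem.Str.slice c (some 0) (some 2) = "PU") :
    pvLetters (c :: cs) = pvLetters cs := by
  simp [pvLetters, h]

lemma pvLast_def (c : String) :
    (PySem.List.pyGet? (PySem.Str.split₀ c) (-1)).getD "" = pvLast c := rfl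

lemma pv_drop_succ {α : Type} (x : α) (l : List α) (n : Nat) :
    (x :: l).drop (n + 1) = l.drop n := rfl

-- second pass collects exactly the letters with push index ≥ removed
lemma pv_collect_eq (r : Nat) (cs : List String) : ∀ (out : List String) (i : Nat),
    (cs.foldl (pvCollect r) (out, i)).1 = out ++ (pvLetters cs).drop (r - i) := by
  induction cs with
  | nil => intro out i; simp [pvLetters]
  | cons c cs ih =>
    intro out i
    by_cases h1 : PySem.Str.slice c (some 0) (some 2) = "PU"
    · simp only [List.foldl_cons, pvCollect, if_pos h1, pvLetters_cons_pu c cs h1]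
      rw [ih]
      by_cases h2 : r ≤ i
      · simp [if_pos h2, Nat.sub_eq_zero_of_le h2, Nat.sub_eq_zero_of_le (by omega : r ≤ i + 1)]
      · have hri : r - i = (r - (i + 1)) + 1 := by omega
        simp only [if_neg h2, hri, pv_drop_succ]
    · simp only [List.foldl_cons, pvCollect, if_neg h1, pvLetters_cons_other c cs h1]
      exact ih out i

-- main invariant: A's queue equals the pushed-letter list minus the removed prefix
lemma pv_loop_inv (cs : List String) : ∀ (q : List String) (p r : Nat),
    r ≤ p → q.length = p - r →
    cs.foldl pvStepA q = (q ++ pvLetters cs).drop ((cs.foldl pvCount (p, r)).2 - r)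
      ∧ r ≤ (cs.foldl pvCount (p, r)).2 := by
  induction cs with
  | nil =>
    intro q p r hrp hlen
    simp [pvLetters]
  | cons c cs ih =>
    intro q p r hrp hlen
    by_cases h1 : PySem.Str.slice c (some 0) (some 2) = "PU"
    · -- PUSH
      simp only [List.foldl_cons, pvStepA, pvCount, if_pos h1, pvLetters_cons_pu c cs h1,
        pvLast_def]
      have h := ih (q ++ [pvLast c]) (p + 1) r (by omega) (by simp [hlen]; omega)
      refine ⟨?_, h.2⟩
      rw [h.1]
      simp
    · by_cases h2 : PySem.Str.slice c (some 0) (some 2) = "PO"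
      · by_cases h3 : q = []
        · -- POP on empty queue: r = p, counter unchanged
          have hr : r = p := by
            have := hlen; rw [h3] at this; simp at this; omega
          have hc : ¬ (PySem.Str.slice c (some 0) (some 2) = "PO" ∧ r < p) := by omega
          simp only [List.foldl_cons, pvStepA, pvCount, if_neg h1, if_pos h2, if_pos h3, if_neg hc,
            pvLetters_cons_other c cs h1]
          exact ih q p r hrp hlen
        · -- POP on nonempty queue: r < p, counter increments
          have hq : 0 < q.length := List.length_pos_iff.mpr h3
          have hrp' : r < p := by omega
          have hc : (PySem.Str.slice c (some 0) (some 2) = "PO" ∧ r < p) := ⟨h2, hrp'⟩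
          simp only [List.foldl_cons, pvStepA, pvCount, if_neg h1, if_pos h2, if_neg h3, if_pos hc,
            pvLetters_cons_other c cs h1]
          have h := ih q.tail p (r + 1) (by omega) (by simp [hlen]; omega)
          have hR := h.2
          refine ⟨?_, by omega⟩
          rw [h.1]
          have hsub : (cs.foldl pvCount (p, r + 1)).2 - r
              = ((cs.foldl pvCount (p, r + 1)).2 - (r + 1)) + 1 := by omega
          rw [hsub]
          obtain ⟨x, q', rfl⟩ := List.exists_cons_of_ne_nil h3
          simp
      · -- other command: both unchanged
        have hc : ¬ (PySem.Str.slice c (some 0) (some 2) = "PO" ∧ r < p) := fun h => h2 h.1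
        simp only [List.foldl_cons, pvStepA, pvCount, if_neg h1, if_neg h2, if_neg hc,
          pvLetters_cons_other c cs h1]
        exact ih q p r hrp hlen

-- ===== VERDICT =====
theorem letter_queue_spec : Claim_equal_letter_queue := by
  intro commands _
  unfold Spec_letter_queue letter_queue letter_queue_alt
  have h := pv_loop_inv commands [] 0 0 (by omega) (by simp)
  simp only [pv_collect_eq]
  rw [h.1]
  simp
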